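-- pv_equiv track=rewrite | github.com/aymak91/HackerRankSolutions | 2023-11-13/product_data_management.py | getMatchingProducts
-- ===== SOURCE A (Python) =====
-- from collections import defaultdict as ddict
--
-- def getMatchingProducts(products, queries):
--     # Create a dictionary where the keys are years and the values are lists of product names
--     product_by_year = ddict(list)
--
--     # Populate the dictionary with product data
--     for name, price, year in products:
--         product_by_year[year].append(name)
--
--     # Initialize a list to store the results
--     res = list()
--     # Iterate over the queries
--     for t, v in queries:
--         # If the query type is 'Type1', append the list of products for the given year
--         if t == 'Type1':
--             res.append(product_by_year[v])
--         # If the query type is 'Type2', append a list of products with a price less than the given value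
--         elif t == 'Type2':
--             res.append([ product[0] for product in products if int(product[1]) < int(v) ])
--         # If the query type is 'Type3', append a list of products with a price greater than the given value
--         elif t == 'Type3':
--             res.append([ product[0] for product in products if int(product[1]) > int(v) ])
--
--     # Return the result list
--     return res
-- ===== SOURCE B (Python) =====
-- def getMatchingProducts(products, queries):
--     def answer(t, v):
--         if t == 'Type1':
--             return [name for name, price, year in products if year == v]
--         if t == 'Type2':
--             return [name for name, price, year in products if int(price) < int(v)]
--         return [name for name, price, year in products if int(price) > int(v)]
--     return [answer(t, v) for t, v in queries if t in ('Type1', 'Type2', 'Type3')]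
-- ===== Notes on version B (the rewrite author's own statement) =====
-- stated objective: simpler
-- what changed: Drops the pre-built year->names defaultdict index entirely and answers every query (including Type1) by a single direct scan over products, emitting results with one comprehension that skips unknown query types instead of an accumulator loop.
import Mathlib
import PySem

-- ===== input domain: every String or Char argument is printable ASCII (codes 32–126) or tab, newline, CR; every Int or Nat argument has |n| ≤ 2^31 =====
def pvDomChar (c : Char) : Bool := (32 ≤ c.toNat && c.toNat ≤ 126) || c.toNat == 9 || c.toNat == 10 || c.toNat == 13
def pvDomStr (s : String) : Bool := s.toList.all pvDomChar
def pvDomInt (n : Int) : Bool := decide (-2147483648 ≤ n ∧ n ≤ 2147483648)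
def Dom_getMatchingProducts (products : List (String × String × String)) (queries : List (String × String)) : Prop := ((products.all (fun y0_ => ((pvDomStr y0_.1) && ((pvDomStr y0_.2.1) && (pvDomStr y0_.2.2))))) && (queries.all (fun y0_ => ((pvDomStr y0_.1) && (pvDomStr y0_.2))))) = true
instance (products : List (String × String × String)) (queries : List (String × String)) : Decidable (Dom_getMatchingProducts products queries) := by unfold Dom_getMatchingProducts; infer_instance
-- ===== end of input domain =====

-- B drops A's pre-built year->names defaultdict index and answers every query by a direct
-- scan over products via one comprehension (objective: simpler). Return values only:
-- A mutates no argument; both raise identically outside Pre_ (int() failures).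

-- ===== PORT A =====
-- int(s) under Pre_ (parse always succeeds there); getD 0 is never reached inside Pre_
def pvInt (s : String) : Int := (PySem.Int.ofStr? s).getD 0

def getMatchingProducts (products : List (String × String × String)) (queries : List (String × String)) : List (List String) :=
  -- product_by_year = ddict(list); for name, price, year in products: product_by_year[year].append(name)
  let product_by_year : PySem.Dict String (List String) :=
    products.foldl (fun d p => d.modify p.2.2 [] (· ++ [p.1])) PySem.Dict.empty
  -- res = []; for t, v in queries: …
  queries.foldl (fun res q =>
    if q.1 = "Type1" then
      res ++ [product_by_year.getD q.2 []]
    else if q.1 = "Type2" then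
      res ++ [(products.filter (fun p => pvInt p.2.1 < pvInt q.2)).map (·.1)]
    else if q.1 = "Type3" then
      res ++ [(products.filter (fun p => pvInt p.2.1 > pvInt q.2)).map (·.1)]
    else res) []

-- ===== PORT B =====
def pvAnswer (products : List (String × String × String)) (t v : String) : List String :=
  if t = "Type1" then (products.filter (fun p => p.2.2 == v)).map (·.1)
  else if t = "Type2" then (products.filter (fun p => pvInt p.2.1 < pvInt v)).map (·.1)
  else (products.filter (fun p => pvInt p.2.1 > pvInt v)).map (·.1)

def getMatchingProducts_alt (products : List (String × String × String)) (queries : List (String × String)) : List (List String) :=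
  (queries.filter (fun q => q.1 == "Type1" || q.1 == "Type2" || q.1 == "Type3")).map
    (fun q => pvAnswer products q.1 q.2)

-- ===== PRECONDITION & SPEC =====
-- Pre_ excludes exactly the inputs where Python A raises ValueError: a Type2/Type3 query
-- whose threshold or some product price does not parse as int (with a nonempty product list,
-- since the comprehension never calls int() on an empty list).
def Pre_getMatchingProducts (products : List (String × String × String)) (queries : List (String × String)) : Prop :=
  products = [] ∨ ∀ q ∈ queries, (q.1 = "Type2" ∨ q.1 = "Type3") →
    (PySem.Int.ofStr? q.2).isSome ∧ ∀ p ∈ products, (PySem.Int.ofStr? p.2.1).isSome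
instance (products : List (String × String × String)) (queries : List (String × String)) : Decidable (Pre_getMatchingProducts products queries) := by unfold Pre_getMatchingProducts; infer_instance

def pvWitness_getMatchingProducts : (List (String × String × String)) × (List (String × String)) :=
  ([("apple", "10", "2020"), ("pear", "3", "2021")],
   [("Type1", "2020"), ("Type2", "5"), ("Type3", "5"), ("Type4", "x")])

def Spec_getMatchingProducts (products : List (String × String × String)) (queries : List (String × String)) (out : List (List String)) : Prop := out = getMatchingProducts_alt products queries
instance (products : List (String × String × String)) (queries : List (String × String)) (out : List (List String)) : Decidable (Spec_getMatchingProducts products queries out) := by unfold Spec_getMatchingProducts; infer_instance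

-- ===== CLAIM (what is proved, stated in full; the proofs are below) =====
def Claim_equal_getMatchingProducts : Prop := ∀ (products : List (String × String × String)) (queries : List (String × String)), Dom_getMatchingProducts products queries → Pre_getMatchingProducts products queries → Spec_getMatchingProducts products queries (getMatchingProducts products queries)

-- ===== LEMMAS AND PROOFS =====

-- A's year index looked up at v gives exactly B's direct year scan.
theorem pv_dict_scan (v : String) :
    ∀ (products : List (String × String × String)) (d : PySem.Dict String (List String)),
    (products.foldl (fun d p => d.modify p.2.2 [] (· ++ [p.1])) d).getD v []
      = d.getD v [] ++ (products.filter (fun p => p.2.2 == v)).map (·.1) := by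
  intro products
  induction products with
  | nil => intro d; simp
  | cons p rest ih =>
    intro d
    simp only [List.foldl_cons, ih, List.filter_cons]
    by_cases h : p.2.2 = v
    · subst h
      simp [PySem.Dict.getD_modify_self]
    · rw [PySem.Dict.getD_modify_of_ne _ _ _ (Ne.symm h)]
      simp [h]

-- A's query loop equals B's filter-then-map over the queries.
theorem pv_loop (products : List (String × String × String)) :
    ∀ (queries : List (String × String)) (res : List (List String)),
    queries.foldl (fun res q =>
      if q.1 = "Type1" then
        res ++ [(products.foldl (fun d p => d.modify p.2.2 [] (· ++ [p.1])) PySem.Dict.empty).getD q.2 []]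
      else if q.1 = "Type2" then
        res ++ [(products.filter (fun p => pvInt p.2.1 < pvInt q.2)).map (·.1)]
      else if q.1 = "Type3" then
        res ++ [(products.filter (fun p => pvInt p.2.1 > pvInt q.2)).map (·.1)]
      else res) res
      = res ++ (queries.filter (fun q => q.1 == "Type1" || q.1 == "Type2" || q.1 == "Type3")).map
          (fun q => pvAnswer products q.1 q.2) := by
  intro queries
  induction queries with
  | nil => intro res; simp
  | cons q rest ih =>
    intro res
    simp only [List.foldl_cons, List.filter_cons]
    by_cases h1 : q.1 = "Type1"
    · rw [if_pos h1, ih, pv_dict_scan]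
      simp [pvAnswer, h1, PySem.Dict.getD_empty]
    · rw [if_neg h1]
      by_cases h2 : q.1 = "Type2"
      · rw [if_pos h2, ih]
        simp [pvAnswer, h2]
      · rw [if_neg h2]
        by_cases h3 : q.1 = "Type3"
        · rw [if_pos h3, ih]
          simp [pvAnswer, h3]
        · rw [if_neg h3, ih]
          simp [h1, h2, h3]

-- ===== VERDICT (by name: the statement is the Claim_ definition above) =====
theorem getMatchingProducts_spec : Claim_equal_getMatchingProducts := by
  intro products queries _ _
  show getMatchingProducts products queries = getMatchingProducts_alt products queries
  unfold getMatchingProducts getMatchingProducts_alt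
  simpa using pv_loop products queries []
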